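-- pv_equiv track=rewrite | github.com/splendidz/ar_drl_cluster_tool | src/json_parser.py | expand_unit_name_wildcards
-- ===== SOURCE A (Python) =====
-- from typing import List
--
-- def expand_unit_name_wildcards(ori_unit_names, wildcard_list: List[str]) -> List[str]:
--
--     expanded_units = []
--     for item in wildcard_list:
--         if "*" in item:
--             prefix = item.split("*")[0]  # Get the prefix before the '*'
--             expanded_units.extend([unit for unit in ori_unit_names if unit.startswith(prefix)])
--         else:
--             expanded_units.append(item)
--
--     return expanded_units
-- ===== SOURCE B (Python) =====
-- def expand_unit_name_wildcards(ori_unit_names, wildcard_list):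
--     # One pass over ori_unit_names filling a bucket per wildcard, instead of
--     # rescanning the whole name list for every wildcard item.
--     prefixes = [item.split("*")[0] for item in wildcard_list if "*" in item]
--     buckets = [[] for _ in prefixes]
--     for unit in ori_unit_names:
--         for b, prefix in zip(buckets, prefixes):
--             if unit.startswith(prefix):
--                 b.append(unit)
--     out = []
--     it = iter(buckets)
--     for item in wildcard_list:
--         if "*" in item:
--             out.extend(next(it))
--         else:
--             out.append(item)
--     return out
-- ===== Notes on version B (the rewrite author's own statement) =====
-- stated objective: alternative
-- what changed: Instead of rescanning the whole name list for every wildcard item, B extracts the wildcard prefixes once, fills one bucket per prefix in a single pass over the names, and then emits buckets/literals in wildcard order.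
import Mathlib
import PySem

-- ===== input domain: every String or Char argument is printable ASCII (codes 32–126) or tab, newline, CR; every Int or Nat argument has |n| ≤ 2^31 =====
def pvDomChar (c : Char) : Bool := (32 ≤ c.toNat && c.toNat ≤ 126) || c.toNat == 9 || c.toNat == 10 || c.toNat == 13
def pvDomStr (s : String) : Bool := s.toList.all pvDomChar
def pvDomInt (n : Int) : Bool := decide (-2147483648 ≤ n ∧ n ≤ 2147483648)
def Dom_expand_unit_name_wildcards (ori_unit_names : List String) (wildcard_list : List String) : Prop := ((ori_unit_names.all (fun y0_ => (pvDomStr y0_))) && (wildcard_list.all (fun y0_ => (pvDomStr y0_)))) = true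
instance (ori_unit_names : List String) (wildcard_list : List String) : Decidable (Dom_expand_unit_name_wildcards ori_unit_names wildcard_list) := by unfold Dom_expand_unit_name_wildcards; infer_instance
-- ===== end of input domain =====

-- ===== PORT A =====
-- B replaces A's per-wildcard rescans of ori_unit_names by one pass over the names
-- filling a bucket per wildcard prefix (objective: alternative; same worst-case cost).
-- 'item.split("*")[0]': sep "*" ≠ "" so split? is some, and a split result is never
-- empty, so '[0]' never raises; '(…).getD []).headD ""' is exact here.
def expand_unit_name_wildcards (ori_unit_names : List String) (wildcard_list : List String) : List String :=
  wildcard_list.foldl (fun expanded_units item =>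
    if PySem.Str.isIn "*" item then
      let pre := ((PySem.Str.split? item "*").getD []).headD ""
      expanded_units ++ ori_unit_names.filter (fun unit => PySem.Str.startswith unit pre)
    else expanded_units ++ [item]) []

-- ===== PORT B =====
-- out-building loop of Source B: consume one bucket per '*'-item (the iterator 'it')
def pvEmit (ws : List String) (bs : List (List String)) : List String :=
  match ws, bs with
  | [], _ => []
  | item :: rest, bs =>
    if PySem.Str.isIn "*" item then
      bs.headD [] ++ pvEmit rest bs.tail
    else item :: pvEmit rest bs

def expand_unit_name_wildcards_alt (ori_unit_names : List String) (wildcard_list : List String) : List String :=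
  let prefixes := (wildcard_list.filter (fun item => PySem.Str.isIn "*" item)).map
      (fun item => ((PySem.Str.split? item "*").getD []).headD "")
  let buckets0 := prefixes.map (fun _ => ([] : List String))
  let buckets := ori_unit_names.foldl (fun bs unit =>
      (bs.zip prefixes).map (fun bp =>
        if PySem.Str.startswith unit bp.2 then bp.1 ++ [unit] else bp.1)) buckets0
  pvEmit wildcard_list buckets

-- ===== PRECONDITION & SPEC =====
def Spec_expand_unit_name_wildcards (ori_unit_names : List String) (wildcard_list : List String) (out : List String) : Prop := out = expand_unit_name_wildcards_alt ori_unit_names wildcard_list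
instance (ori_unit_names : List String) (wildcard_list : List String) (out : List String) : Decidable (Spec_expand_unit_name_wildcards ori_unit_names wildcard_list out) := by unfold Spec_expand_unit_name_wildcards; infer_instance

-- ===== CLAIM (what is proved, stated in full; the proofs are below) =====
def Claim_equal_expand_unit_name_wildcards : Prop := ∀ (ori_unit_names : List String) (wildcard_list : List String), Dom_expand_unit_name_wildcards ori_unit_names wildcard_list → Spec_expand_unit_name_wildcards ori_unit_names wildcard_list (expand_unit_name_wildcards ori_unit_names wildcard_list)

-- ===== LEMMAS AND PROOFS =====

-- the buckets fold: each bucket ends as its initial value plus the matching names, in order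
theorem pvZipMap (u : String) (prefixes : List String) (acc : String → List String) :
    ((prefixes.map acc).zip prefixes).map (fun bp =>
        if PySem.Str.startswith u bp.2 then bp.1 ++ [u] else bp.1)
      = prefixes.map (fun p => if PySem.Str.startswith u p then acc p ++ [u] else acc p) := by
  induction prefixes with
  | nil => rfl
  | cons p ps ihp => simp only [List.map_cons, List.zip_cons_cons, ihp]

-- the buckets fold: each bucket ends as its initial value plus the matching names, in order
theorem pvBuckets_fold (ori prefixes : List String) (acc : String → List String) :
    ori.foldl (fun bs unit =>
      (bs.zip prefixes).map (fun bp =>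
        if PySem.Str.startswith unit bp.2 then bp.1 ++ [unit] else bp.1))
      (prefixes.map acc)
    = prefixes.map (fun p => acc p ++ ori.filter (fun u => PySem.Str.startswith u p)) := by
  induction ori generalizing acc with
  | nil => simp
  | cons u rest ih =>
    simp only [List.foldl_cons]
    rw [pvZipMap u prefixes acc, ih (fun p => if PySem.Str.startswith u p then acc p ++ [u] else acc p)]
    apply List.map_congr_left
    intro p _
    simp only [List.filter_cons, PySem.Str.startswith_eq]
    by_cases h : PySem.Chars.startswith u.toList p.toList = true <;> simp [h]

-- A's fold equals emitting Source B's final buckets, for any accumulated output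
theorem pvMain (ori ws : List String) (acc : List String) :
    ws.foldl (fun expanded_units item =>
      if PySem.Str.isIn "*" item then
        let pre := ((PySem.Str.split? item "*").getD []).headD ""
        expanded_units ++ ori.filter (fun unit => PySem.Str.startswith unit pre)
      else expanded_units ++ [item]) acc
    = acc ++ pvEmit ws (((ws.filter (fun item => PySem.Str.isIn "*" item)).map
        (fun item => ((PySem.Str.split? item "*").getD []).headD "")).map
        (fun p => ori.filter (fun u => PySem.Str.startswith u p))) := by
  induction ws generalizing acc with
  | nil => simp [pvEmit]
  | cons item rest ih =>
    simp only [List.foldl_cons, List.filter_cons]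
    by_cases h : PySem.Str.isIn "*" item
    · simp only [h, if_true, List.map_cons, pvEmit, ih, List.append_assoc]
      rfl
    · simp only [h, if_false, Bool.false_eq_true, pvEmit, ih, List.append_assoc]
      rfl

-- ===== VERDICT (by name: the statement is the Claim_ definition above) =====
theorem expand_unit_name_wildcards_spec : Claim_equal_expand_unit_name_wildcards := by
  intro ori ws _
  unfold Spec_expand_unit_name_wildcards expand_unit_name_wildcards expand_unit_name_wildcards_alt
  rw [pvMain]
  have := pvBuckets_fold ori ((ws.filter (fun item => PySem.Str.isIn "*" item)).map
      (fun item => ((PySem.Str.split? item "*").getD []).headD "")) (fun _ => [])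
  simp only [this, List.nil_append]
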